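-- pv_equiv track=rewrite | github.com/dotmons/Python | Learning/MaxSubarray.py | max_subarrays_with_same_sum
-- ===== SOURCE A (Python) =====
-- def max_subarrays_with_same_sum(values):
--     sum_counts = {}  # Dictionary to store sum -> frequency mapping
--
--     for start in range(len(values)):
--         sub_sum = 0
--         for end in range(start, len(values)):
--             sub_sum += values[end]
--             sum_counts[sub_sum] = sum_counts.get(sub_sum, 0) + 1
--
--     # Find the highest frequency
--     max_count = max(sum_counts.values(), default=0)
--
--     return max_count
-- ===== SOURCE B (Python) =====
-- def max_subarrays_with_same_sum(values):
--     counts = {}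
--     best = 0
--     ending = []  # sums of the subarrays ending at the current element
--     for v in values:
--         ending = [s + v for s in ending] + [v]
--         for s in ending:
--             c = counts.get(s, 0) + 1
--             counts[s] = c
--             if c > best:
--                 best = c
--     return best
-- ===== Notes on version B (the rewrite author's own statement) =====
-- stated objective: alternative
-- what changed: B makes a single left-to-right sweep that maintains the list of all subarray sums ending at the current element (shift-add of the previous list), counts them and tracks the running best inline, instead of A's start-indexed nested range loops followed by a final max over the dict's values.
import Mathlib
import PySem

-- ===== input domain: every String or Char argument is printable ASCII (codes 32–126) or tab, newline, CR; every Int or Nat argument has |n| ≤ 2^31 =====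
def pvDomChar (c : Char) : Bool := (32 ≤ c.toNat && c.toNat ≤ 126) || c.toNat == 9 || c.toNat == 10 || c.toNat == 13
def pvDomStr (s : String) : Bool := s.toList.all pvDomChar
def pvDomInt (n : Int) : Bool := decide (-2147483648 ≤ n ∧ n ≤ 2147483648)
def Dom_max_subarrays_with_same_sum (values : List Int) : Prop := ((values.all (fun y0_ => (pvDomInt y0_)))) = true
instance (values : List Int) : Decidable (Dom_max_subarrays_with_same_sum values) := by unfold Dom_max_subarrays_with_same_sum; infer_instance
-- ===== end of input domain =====

-- B replaces A's start-indexed nested range loops (running sum per start, final max over the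
-- dict's values) by one left-to-right sweep maintaining the list of subarray sums ending at the
-- current element, counting them and tracking the best inline (alternative, same cost).


-- ===== PORT A =====
def max_subarrays_with_same_sum (values : List Int) : Int :=
  let n : Int := values.length
  let sum_counts : PySem.Dict Int Int :=
    (PySem.List.pyRange 0 n 1).foldl (fun d start =>
      ((PySem.List.pyRange start n 1).foldl
        (fun (st : Int × PySem.Dict Int Int) e =>
          let sub := st.1 + PySem.List.pyGetD values e 0
          (sub, st.2.insert sub (st.2.getD sub 0 + 1)))
        ((0 : Int), d)).2)
      PySem.Dict.empty
  (PySem.List.max? sum_counts.values (fun y => y)).getD 0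

-- ===== PORT B =====
def max_subarrays_with_same_sum_alt (values : List Int) : Int :=
  let st : PySem.Dict Int Int × Int × List Int :=
    values.foldl (fun st v =>
      let ending := st.2.2.map (fun s => s + v) ++ [v]
      let cb :=
        ending.foldl (fun (cb : PySem.Dict Int Int × Int) s =>
          let c := cb.1.getD s 0 + 1
          (cb.1.insert s c, if c > cb.2 then c else cb.2)) (st.1, st.2.1)
      (cb.1, cb.2, ending))
    (PySem.Dict.empty, 0, [])
  st.2.1

-- ===== PRECONDITION & SPEC =====
def Spec_max_subarrays_with_same_sum (values : List Int) (out : Int) : Prop := out = max_subarrays_with_same_sum_alt values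
instance (values : List Int) (out : Int) : Decidable (Spec_max_subarrays_with_same_sum values out) := by unfold Spec_max_subarrays_with_same_sum; infer_instance

-- ===== CLAIM (what is proved, stated in full; the proofs are below) =====
def Claim_equal_max_subarrays_with_same_sum : Prop := ∀ (values : List Int), Dom_max_subarrays_with_same_sum values → Spec_max_subarrays_with_same_sum values (max_subarrays_with_same_sum values)

-- ===== LEMMAS AND PROOFS =====

-- partial sum of the first k elements
def pS (values : List Int) (k : Nat) : Int := (values.take k).sum

-- the subarray sums A visits for a given start index
def rowA (values : List Int) (s : Nat) : List Int :=
  (List.range (values.length - s)).map (fun t => pS values (s + t + 1) - pS values s)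

-- row-major enumeration of all subarray sums (A's order)
def LA (values : List Int) : List Int := (List.range values.length).flatMap (rowA values)

-- the subarray sums ending at index k (B's 'ending' list after step k)
def colB (values : List Int) (k : Nat) : List Int :=
  (List.range (k + 1)).map (fun i => pS values (k + 1) - pS values i)

-- column-major enumeration of all subarray sums (B's order)
def LB (values : List Int) : List Int := (List.range values.length).flatMap (colB values)

-- B's 'ending' list after the whole input has been consumed
def endE (values : List Int) : List Int :=
  (List.range values.length).map (fun i => pS values values.length - pS values i)

-- the maximal multiplicity in a list (0 for the empty list)
def M (l : List Int) : Int := (l.map (fun x => (l.count x : Int))).foldl max 0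

theorem pS_append (xs : List Int) (v : Int) (k : Nat) (h : k ≤ xs.length) :
    pS (xs ++ [v]) k = pS xs k := by
  simp [pS, List.take_append_of_le_length h]

theorem pS_last (xs : List Int) (v : Int) :
    pS (xs ++ [v]) (xs.length + 1) = pS xs xs.length + v := by
  simp [pS]

theorem foldl_max_le (l : List Int) (a b : Int) (h0 : a ≤ b) (h : ∀ y ∈ l, y ≤ b) :
    l.foldl max a ≤ b := by
  induction l generalizing a with
  | nil => exact h0
  | cons x t ih =>
      exact ih (max a x) (max_le h0 (h x (by simp))) (fun y hy => h y (by simp [hy]))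

theorem foldl_max0_le (l l' : List Int) (h : ∀ y ∈ l, y ∈ l') :
    l.foldl max 0 ≤ l'.foldl max 0 := by
  rcases PySem.List.foldl_max_mem l 0 with h0 | hm
  · rw [h0]; exact (PySem.List.le_foldl_max l' 0).1
  · exact (PySem.List.le_foldl_max l' 0).2 _ (h _ hm)

theorem foldl_max0_eq (l l' : List Int) (h : ∀ y, y ∈ l ↔ y ∈ l') :
    l.foldl max 0 = l'.foldl max 0 :=
  le_antisymm (foldl_max0_le l l' (fun y hy => (h y).1 hy))
    (foldl_max0_le l' l (fun y hy => (h y).2 hy))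

theorem M_perm (l l' : List Int) (h : l.Perm l') : M l = M l' := by
  unfold M
  apply foldl_max0_eq
  intro y
  simp only [List.mem_map]
  constructor
  · rintro ⟨x, hx, rfl⟩; exact ⟨x, h.mem_iff.1 hx, by rw [h.count_eq]⟩
  · rintro ⟨x, hx, rfl⟩; exact ⟨x, h.mem_iff.2 hx, by rw [h.count_eq]⟩

theorem M_append_singleton (m : List Int) (x : Int) :
    M (m ++ [x]) = max (M m) ((m.count x : Int) + 1) := by
  apply le_antisymm
  · apply foldl_max_le _ _ _ (le_max_of_le_left (PySem.List.le_foldl_max _ 0).1)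
    intro y hy
    simp only [List.mem_map] at hy
    rcases hy with ⟨z, hz, rfl⟩
    by_cases hzx : z = x
    · subst hzx
      apply le_max_of_le_right
      simp [List.count_append]
    · apply le_max_of_le_left
      have hcz : (m ++ [x]).count z = m.count z := by
        simp only [List.count_append, List.count_singleton]
        have : ¬(x = z) := fun h => hzx h.symm
        simp [this]
      rw [hcz]
      rcases List.mem_append.1 hz with hz | hz
      · exact (PySem.List.le_foldl_max _ 0).2 _ (List.mem_map.2 ⟨z, hz, rfl⟩)
      · simp at hz; exact absurd hz hzx
  · apply max_le
    · apply foldl_max_le _ _ _ (PySem.List.le_foldl_max _ 0).1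
      intro y hy
      simp only [List.mem_map] at hy
      rcases hy with ⟨z, hz, rfl⟩
      calc ((m.count z : Int)) ≤ ((m ++ [x]).count z : Int) := by
            simp [List.count_append]
        _ ≤ _ := (PySem.List.le_foldl_max _ 0).2 _
              (List.mem_map.2 ⟨z, List.mem_append_left _ hz, rfl⟩)
    · have hx : (((m ++ [x]).count x : Int)) = (m.count x : Int) + 1 := by
        simp [List.count_append]
      calc ((m.count x : Int) + 1) = ((m ++ [x]).count x : Int) := hx.symm
        _ ≤ _ := (PySem.List.le_foldl_max _ 0).2 _
              (List.mem_map.2 ⟨x, List.mem_append_right _ (by simp), rfl⟩)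

-- pulling the last element of every row out of a flatMap is a permutation
theorem flatMap_snoc_perm {ι : Type} (l : List ι) (f : ι → List Int) (c : ι → Int) :
    (l.flatMap (fun i => f i ++ [c i])).Perm (l.flatMap f ++ l.map c) := by
  induction l with
  | nil => simp
  | cons a t ih =>
      simp only [List.flatMap_cons, List.map_cons]
      refine ((ih.append_left (f a ++ [c a])).trans ?_)
      have h3 : (c a :: (t.flatMap f ++ t.map c)).Perm (t.flatMap f ++ c a :: t.map c) :=
        List.perm_middle.symm
      have h4 := h3.append_left (f a)
      simpa [List.append_assoc] using h4

-- ===== A-side characterisation =====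

theorem innerA (values : List Int) (s : Nat) :
    ∀ (k a : Nat), a + k = values.length →
    ∀ d : PySem.Dict Int Int,
    ((PySem.List.pyRange (a : Int) (values.length : Int) 1).foldl
        (fun (st : Int × PySem.Dict Int Int) e =>
          (st.1 + PySem.List.pyGetD values e 0,
           st.2.insert (st.1 + PySem.List.pyGetD values e 0)
             (st.2.getD (st.1 + PySem.List.pyGetD values e 0) 0 + 1)))
        ((pS values a - pS values s), d)).2
      = ((List.range k).map (fun t => pS values (a + t + 1) - pS values s)).foldl
          (fun d x => d.insert x (d.getD x 0 + 1)) d := by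
  intro k
  induction k with
  | zero =>
      intro a ha d
      rw [PySem.List.pyRange_one_eq_nil (by omega)]
      simp
  | succ m ih =>
      intro a ha d
      have halt : (a : Int) < (values.length : Int) := by omega
      rw [PySem.List.pyRange_one_cons halt]
      simp only [List.foldl_cons]
      have hidx : a < values.length := by
        omega
      have hstep : pS values a - pS values s + PySem.List.pyGetD values (a : Int) 0
          = pS values (a + 1) - pS values s := by
        rw [PySem.List.pyGetD_natCast values a 0, List.getD_eq_getElem values 0 hidx]
        unfold pS
        rw [List.sum_take_succ values a hidx]
        ring
      rw [hstep]
      have hcast : ((a : Int) + 1) = ((a + 1 : Nat) : Int) := by push_cast; ring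
      rw [hcast, ih (a + 1) (by omega)]
      rw [List.range_succ_eq_map]
      simp only [List.map_cons, List.map_map, List.foldl_cons]
      have hlist : (List.range m).map ((fun t => pS values (a + t + 1) - pS values s) ∘ Nat.succ)
          = (List.range m).map (fun t => pS values (a + 1 + t + 1) - pS values s) := by
        apply List.map_congr_left
        intro t _
        have h5 : a + Nat.succ t + 1 = a + 1 + t + 1 := by omega
        simp [Function.comp, h5]
      rw [hlist]

theorem A_eq (values : List Int) :
    max_subarrays_with_same_sum values
      = (PySem.List.max? (PySem.Dict.counter (LA values)).values (fun y => y)).getD 0 := by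
  unfold max_subarrays_with_same_sum
  have hdict :
      (PySem.List.pyRange 0 (values.length : Int) 1).foldl (fun d start =>
        ((PySem.List.pyRange start (values.length : Int) 1).foldl
          (fun (st : Int × PySem.Dict Int Int) e =>
            let sub := st.1 + PySem.List.pyGetD values e 0
            (sub, st.2.insert sub (st.2.getD sub 0 + 1)))
          ((0 : Int), d)).2)
        PySem.Dict.empty
      = PySem.Dict.counter (LA values) := by
    rw [PySem.List.pyRange_zero_natCast, List.foldl_map,
        ← PySem.Dict.foldl_insert_getD_add_one_eq_counter, LA, List.foldl_flatMap]
    apply PySem.List.foldl_congr_mem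
    intro d s hs
    have hsn : s < values.length := List.mem_range.1 hs
    show ((PySem.List.pyRange (s : Int) (values.length : Int) 1).foldl
          (fun (st : Int × PySem.Dict Int Int) e =>
            (st.1 + PySem.List.pyGetD values e 0,
             st.2.insert (st.1 + PySem.List.pyGetD values e 0)
               (st.2.getD (st.1 + PySem.List.pyGetD values e 0) 0 + 1)))
          ((0 : Int), d)).2
        = (rowA values s).foldl (fun d x => d.insert x (d.getD x 0 + 1)) d
    have h := innerA values s (values.length - s) s (by omega) d
    rw [sub_self] at h
    simpa [rowA] using h
  show (PySem.List.max? ((PySem.List.pyRange 0 ((values.length : Nat) : Int) 1).foldl (fun d start =>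
        ((PySem.List.pyRange start ((values.length : Nat) : Int) 1).foldl
          (fun (st : Int × PySem.Dict Int Int) e =>
            let sub := st.1 + PySem.List.pyGetD values e 0
            (sub, st.2.insert sub (st.2.getD sub 0 + 1)))
          ((0 : Int), d)).2)
        PySem.Dict.empty).values (fun y => y)).getD 0 = _
  rw [hdict]

-- ===== B-side characterisation =====

theorem innerB (l : List Int) :
    ∀ (m : List Int),
    (l.foldl (fun (cb : PySem.Dict Int Int × Int) s =>
        (cb.1.insert s (cb.1.getD s 0 + 1),
         if cb.1.getD s 0 + 1 > cb.2 then cb.1.getD s 0 + 1 else cb.2))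
      (PySem.Dict.counter m, M m))
    = (PySem.Dict.counter (m ++ l), M (m ++ l)) := by
  induction l with
  | nil => intro m; simp
  | cons x t ih =>
      intro m
      simp only [List.foldl_cons]
      have hc : (PySem.Dict.counter m).getD x 0 + 1 = ((m.count x : Int) + 1) := by
        rw [PySem.Dict.getD_counter]
      have hins : (PySem.Dict.counter m).insert x ((PySem.Dict.counter m).getD x 0 + 1)
          = PySem.Dict.counter (m ++ [x]) := by
        rw [← PySem.Dict.foldl_insert_getD_add_one_eq_counter m,
            ← PySem.Dict.foldl_insert_getD_add_one_eq_counter (m ++ [x]),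
            List.foldl_append]
        rfl
      have hbest : (if (PySem.Dict.counter m).getD x 0 + 1 > M m
            then (PySem.Dict.counter m).getD x 0 + 1 else M m) = M (m ++ [x]) := by
        rw [hc, M_append_singleton]
        rcases le_or_gt ((m.count x : Int) + 1) (M m) with h | h
        · rw [if_neg (by omega), max_eq_left h]
        · rw [if_pos h, max_eq_right (le_of_lt h)]
      rw [hins, hbest, ih (m ++ [x]), List.append_assoc]
      rfl

theorem colB_append (xs : List Int) (v : Int) (k : Nat) (hk : k < xs.length) :
    colB (xs ++ [v]) k = colB xs k := by
  unfold colB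
  apply List.map_congr_left
  intro i hi
  rw [pS_append xs v (k + 1) (by omega),
      pS_append xs v i (by simp at hi; omega)]

theorem colB_last (xs : List Int) (v : Int) :
    colB (xs ++ [v]) xs.length = endE (xs ++ [v]) := by
  simp [colB, endE]

theorem LB_append (xs : List Int) (v : Int) :
    LB (xs ++ [v]) = LB xs ++ endE (xs ++ [v]) := by
  unfold LB
  rw [List.length_append, List.length_singleton, List.range_succ, List.flatMap_append]
  simp only [List.flatMap_cons, List.flatMap_nil, List.append_nil]
  rw [colB_last]
  congr 1
  apply List.flatMap_congr
  intro k hk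
  exact colB_append xs v k (List.mem_range.1 hk)

theorem endE_append (xs : List Int) (v : Int) :
    (endE xs).map (fun s => s + v) ++ [v] = endE (xs ++ [v]) := by
  unfold endE
  rw [List.length_append, List.length_singleton, List.range_succ, List.map_append, List.map_map]
  congr 1
  · apply List.map_congr_left
    intro i hi
    have hin : i < xs.length := List.mem_range.1 hi
    simp only [Function.comp]
    rw [pS_last, pS_append xs v i (by omega)]
    ring
  · simp only [List.map_cons, List.map_nil]
    rw [pS_last, pS_append xs v xs.length le_rfl]
    simp [pS]

theorem B_inv (values : List Int) :
    values.foldl (fun st v =>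
      let ending := st.2.2.map (fun s => s + v) ++ [v]
      let cb :=
        ending.foldl (fun (cb : PySem.Dict Int Int × Int) s =>
          let c := cb.1.getD s 0 + 1
          (cb.1.insert s c, if c > cb.2 then c else cb.2)) (st.1, st.2.1)
      (cb.1, cb.2, ending))
    ((PySem.Dict.empty : PySem.Dict Int Int), (0 : Int), ([] : List Int))
    = (PySem.Dict.counter (LB values), M (LB values), endE values) := by
  induction values using List.reverseRecOn with
  | nil => rfl
  | append_singleton xs v ih =>
      rw [List.foldl_append, ih]
      simp only [List.foldl_cons, List.foldl_nil]
      rw [endE_append, LB_append]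
      have := innerB (endE (xs ++ [v])) (LB xs)
      exact congrArg (fun p : PySem.Dict Int Int × Int => (p.1, p.2, endE (xs ++ [v]))) this

theorem B_eq (values : List Int) :
    max_subarrays_with_same_sum_alt values = M (LB values) := by
  unfold max_subarrays_with_same_sum_alt
  rw [B_inv]

-- ===== the two enumerations are permutations of each other =====

theorem LA_perm_LB (values : List Int) : (LA values).Perm (LB values) := by
  induction values using List.reverseRecOn with
  | nil => simp [LA, LB]
  | append_singleton xs v ih =>
      have hrow : ∀ s ∈ List.range xs.length,
          rowA (xs ++ [v]) s
            = rowA xs s ++ [pS (xs ++ [v]) (xs.length + 1) - pS (xs ++ [v]) s] := by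
        intro s hs
        have hsn : s < xs.length := List.mem_range.1 hs
        unfold rowA
        rw [List.length_append, List.length_singleton]
        have hr : xs.length + 1 - s = (xs.length - s) + 1 := by omega
        rw [hr, List.range_succ, List.map_append]
        congr 1
        · apply List.map_congr_left
          intro t ht
          have htn : t < xs.length - s := List.mem_range.1 ht
          rw [pS_append xs v (s + t + 1) (by omega), pS_append xs v s (by omega)]
        · simp only [List.map_cons, List.map_nil]
          have h6 : s + (xs.length - s) + 1 = xs.length + 1 := by omega
          rw [h6]
      have hlast : rowA (xs ++ [v]) xs.length
          = [pS (xs ++ [v]) (xs.length + 1) - pS (xs ++ [v]) xs.length] := by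
        unfold rowA
        rw [List.length_append, List.length_singleton]
        have hr : xs.length + 1 - xs.length = 1 := by omega
        rw [hr]
        simp [List.range_succ]
      have hLA : LA (xs ++ [v])
          = (List.range xs.length).flatMap
              (fun s => rowA xs s ++ [pS (xs ++ [v]) (xs.length + 1) - pS (xs ++ [v]) s])
            ++ [pS (xs ++ [v]) (xs.length + 1) - pS (xs ++ [v]) xs.length] := by
        unfold LA
        rw [List.length_append, List.length_singleton, List.range_succ, List.flatMap_append]
        simp only [List.flatMap_cons, List.flatMap_nil, List.append_nil]
        rw [hlast]
        congr 1
        exact List.flatMap_congr hrow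
      have hmapc : (List.range xs.length).map
              (fun s => pS (xs ++ [v]) (xs.length + 1) - pS (xs ++ [v]) s)
            ++ [pS (xs ++ [v]) (xs.length + 1) - pS (xs ++ [v]) xs.length]
          = endE (xs ++ [v]) := by
        unfold endE
        rw [List.length_append, List.length_singleton, List.range_succ, List.map_append]
        simp
      rw [hLA, LB_append]
      refine ((flatMap_snoc_perm (List.range xs.length) (rowA xs) _).append_right _).trans ?_
      rw [List.append_assoc, hmapc]
      exact (ih.append_right _)

-- ===== final assembly =====

theorem max_counter (l : List Int) :
    (PySem.List.max? (PySem.Dict.counter l).values (fun y => y)).getD 0 = M l := by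
  have hvals : (PySem.Dict.counter l).values
      = (PySem.Set.ofList l).map (fun k => (l.count k : Int)) := by
    show ((PySem.Dict.counter l).items).map (·.2) = _
    rw [PySem.Dict.items_counter, List.map_map]
    rfl
  rw [hvals]
  have hmem : ∀ y, y ∈ (PySem.Set.ofList l).map (fun k => (l.count k : Int))
      ↔ y ∈ l.map (fun x => (l.count x : Int)) := by
    intro y
    simp only [List.mem_map]
    constructor
    · rintro ⟨k, hk, rfl⟩; exact ⟨k, (PySem.Set.mem_ofList l k).1 hk, rfl⟩
    · rintro ⟨k, hk, rfl⟩; exact ⟨k, (PySem.Set.mem_ofList l k).2 hk, rfl⟩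
  rcases hS : (PySem.Set.ofList l).map (fun k => (l.count k : Int)) with _ | ⟨x, rest⟩
  · cases l with
    | nil => rfl
    | cons h t =>
        exfalso
        have : ((h :: t).count h : Int) ∈ (PySem.Set.ofList (h :: t)).map
            (fun k => ((h :: t).count k : Int)) :=
          List.mem_map.2 ⟨h, (PySem.Set.mem_ofList _ h).2 (by simp), rfl⟩
        rw [hS] at this
        simp at this
  · rw [PySem.List.max?_id_cons, Option.getD_some]
    have hx0 : (0 : Int) ≤ x := by
      have : x ∈ x :: rest := by simp
      rw [← hS] at this
      rcases List.mem_map.1 this with ⟨k, _, hk⟩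
      omega
    have h1 : rest.foldl max x = (x :: rest).foldl max 0 := by
      simp only [List.foldl_cons]
      rw [max_eq_right hx0]
    rw [h1, ← hS]
    unfold M
    exact foldl_max0_eq _ _ hmem

-- ===== VERDICT =====
theorem max_subarrays_with_same_sum_spec : Claim_equal_max_subarrays_with_same_sum := by
  intro values _
  unfold Spec_max_subarrays_with_same_sum
  rw [A_eq, max_counter, B_eq, M_perm _ _ (LA_perm_LB values)]
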